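-- pv_equiv track=rewrite | github.com/abcdefya/Day06-401-X1-VinMecLumina | src/nodes/suggest_node.py | _overall_severity
-- ===== SOURCE A (Python) =====
-- from typing import Any, Callable
--
-- SEVERITY_TO_PRIORITY = {
--     "NORMAL": "routine",
--     "WATCH": "follow_up",
--     "SEE_DOCTOR": "doctor_soon",
--     "CRITICAL": "urgent",
-- }
--
-- def _overall_severity(state: dict[str, Any], lab_results: list[dict[str, Any]]) -> str:
--     severity = str(state.get("overall_severity") or "").strip().upper()
--     if severity in SEVERITY_TO_PRIORITY:
--         return severity
--
--     flags = {str(item.get("flag", "NORMAL")).upper() for item in lab_results}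
--     if {"CRITICAL_LOW", "CRITICAL_HIGH"} & flags:
--         return "CRITICAL"
--     if {"HIGH", "LOW"} & flags:
--         if len([item for item in lab_results if str(item.get("flag", "NORMAL")).upper() in {"HIGH", "LOW"}]) >= 3:
--             return "SEE_DOCTOR"
--         return "WATCH"
--     return "NORMAL"
-- ===== SOURCE B (Python) =====
-- SEVERITY_TO_PRIORITY = {
--     "NORMAL": "routine",
--     "WATCH": "follow_up",
--     "SEE_DOCTOR": "doctor_soon",
--     "CRITICAL": "urgent",
-- }
--
-- def _overall_severity(state, lab_results):
--     severity = str(state.get("overall_severity") or "").strip().upper()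
--     if severity in SEVERITY_TO_PRIORITY:
--         return severity
--     has_critical = False
--     hl_count = 0
--     for item in lab_results:
--         flag = str(item.get("flag", "NORMAL")).upper()
--         if flag in ("CRITICAL_LOW", "CRITICAL_HIGH"):
--             has_critical = True
--         elif flag in ("HIGH", "LOW"):
--             hl_count += 1
--     if has_critical:
--         return "CRITICAL"
--     if hl_count >= 3:
--         return "SEE_DOCTOR"
--     if hl_count >= 1:
--         return "WATCH"
--     return "NORMAL"
-- ===== Notes on version B (the rewrite author's own statement) =====
-- stated objective: simpler
-- what changed: B replaces A's flag-set comprehension plus membership tests plus a second filtering pass over lab_results with a single loop that accumulates a has_critical boolean and a HIGH/LOW count, then decides the severity from those two accumulators.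
import Mathlib
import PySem

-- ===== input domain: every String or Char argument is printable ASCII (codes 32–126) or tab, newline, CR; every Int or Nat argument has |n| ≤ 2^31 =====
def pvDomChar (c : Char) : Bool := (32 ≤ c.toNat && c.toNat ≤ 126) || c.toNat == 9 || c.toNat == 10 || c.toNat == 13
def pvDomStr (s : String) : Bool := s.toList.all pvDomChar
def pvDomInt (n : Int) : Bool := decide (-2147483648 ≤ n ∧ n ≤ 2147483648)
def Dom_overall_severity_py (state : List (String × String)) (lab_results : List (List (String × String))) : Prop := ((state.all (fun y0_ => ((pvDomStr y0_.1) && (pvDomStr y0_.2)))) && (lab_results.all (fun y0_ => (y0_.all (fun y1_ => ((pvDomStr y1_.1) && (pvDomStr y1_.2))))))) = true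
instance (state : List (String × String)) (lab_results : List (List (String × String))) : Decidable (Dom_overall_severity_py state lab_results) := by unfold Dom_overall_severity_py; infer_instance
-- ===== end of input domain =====

-- B derives the severity in one accumulating pass (has_critical flag + HIGH/LOW count) instead of A's
-- flag-set comprehension with membership tests plus a second filtering pass; objective: simpler.

-- ===== PORT A =====
def pvSeverityToPriority : PySem.Dict String String :=
  PySem.Dict.ofList [("NORMAL", "routine"), ("WATCH", "follow_up"), ("SEE_DOCTOR", "doctor_soon"), ("CRITICAL", "urgent")]

-- str(item.get("flag", "NORMAL")).upper()
def pvFlagOf (item : List (String × String)) : String :=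
  PySem.Str.upper (PySem.Dict.getD (PySem.Dict.mk item) "flag" "NORMAL")

def overall_severity_py (state : List (String × String)) (lab_results : List (List (String × String))) : String :=
  let severity := PySem.Str.upper (PySem.Str.strip (((PySem.Dict.mk state).get? "overall_severity").getD ""))
  if pvSeverityToPriority.contains severity then severity
  else
    let flags : PySem.Set String := PySem.Set.ofList (lab_results.map pvFlagOf)
    if ¬ (PySem.Set.inter (PySem.Set.ofList ["CRITICAL_LOW", "CRITICAL_HIGH"]) flags).isEmpty then "CRITICAL"
    else if ¬ (PySem.Set.inter (PySem.Set.ofList ["HIGH", "LOW"]) flags).isEmpty then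
      if 3 ≤ (lab_results.filter (fun item => pvFlagOf item == "HIGH" || pvFlagOf item == "LOW")).length then
        "SEE_DOCTOR"
      else "WATCH"
    else "NORMAL"

-- ===== PORT B =====
def pvStep (p : Bool × Nat) (item : List (String × String)) : Bool × Nat :=
  let flag := pvFlagOf item
  if flag == "CRITICAL_LOW" || flag == "CRITICAL_HIGH" then (true, p.2)
  else if flag == "HIGH" || flag == "LOW" then (p.1, p.2 + 1)
  else p

def overall_severity_py_alt (state : List (String × String)) (lab_results : List (List (String × String))) : String :=
  let severity := PySem.Str.upper (PySem.Str.strip (((PySem.Dict.mk state).get? "overall_severity").getD ""))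
  if pvSeverityToPriority.contains severity then severity
  else
    let acc := lab_results.foldl pvStep (false, 0)
    if acc.1 then "CRITICAL"
    else if 3 ≤ acc.2 then "SEE_DOCTOR"
    else if 1 ≤ acc.2 then "WATCH"
    else "NORMAL"

-- ===== PRECONDITION & SPEC =====
def Spec_overall_severity_py (state : List (String × String)) (lab_results : List (List (String × String))) (out : String) : Prop := out = overall_severity_py_alt state lab_results
instance (state : List (String × String)) (lab_results : List (List (String × String))) (out : String) : Decidable (Spec_overall_severity_py state lab_results out) := by unfold Spec_overall_severity_py; infer_instance

-- ===== CLAIM (what is proved, stated in full; the proofs are below) =====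
def Claim_equal_overall_severity_py : Prop := ∀ (state : List (String × String)) (lab_results : List (List (String × String))), Dom_overall_severity_py state lab_results → Spec_overall_severity_py state lab_results (overall_severity_py state lab_results)

-- ===== LEMMAS AND PROOFS =====

theorem pvFold_spec (l : List (List (String × String))) (b : Bool) (n : Nat) :
    l.foldl pvStep (b, n) =
      (b || l.any (fun it => pvFlagOf it == "CRITICAL_LOW" || pvFlagOf it == "CRITICAL_HIGH"),
       n + (l.filter (fun it => pvFlagOf it == "HIGH" || pvFlagOf it == "LOW")).length) := by
  induction l generalizing b n with
  | nil => simp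
  | cons x xs ih =>
    simp only [List.foldl_cons, List.any_cons, List.filter_cons, pvStep]
    by_cases h1 : (pvFlagOf x == "CRITICAL_LOW" || pvFlagOf x == "CRITICAL_HIGH") = true
    · have h2 : (pvFlagOf x == "HIGH" || pvFlagOf x == "LOW") = false := by
        simp only [Bool.or_eq_true, beq_iff_eq] at h1
        rcases h1 with h | h <;> simp [h]
      simp [h1, h2, ih]
    · simp only [Bool.not_eq_true] at h1
      by_cases h2 : (pvFlagOf x == "HIGH" || pvFlagOf x == "LOW") = true
      · simp [h1, h2, ih, Nat.add_assoc, Nat.add_comm]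
      · simp only [Bool.not_eq_true] at h2
        simp [h1, h2, ih]

theorem pvInter_isEmpty_false (keys : List String) (l : List (List (String × String))) :
    ((PySem.Set.inter (PySem.Set.ofList keys) (PySem.Set.ofList (l.map pvFlagOf))).isEmpty = false)
      ↔ ∃ it ∈ l, pvFlagOf it ∈ keys := by
  rw [List.isEmpty_eq_false_iff]
  constructor
  · intro h
    obtain ⟨x, hx⟩ := List.exists_mem_of_ne_nil _ h
    have := (PySem.Set.mem_inter _ _ _).mp hx
    rw [PySem.Set.mem_ofList, PySem.Set.mem_ofList, List.mem_map] at this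
    obtain ⟨hk, it, hit, rfl⟩ := this
    exact ⟨it, hit, hk⟩
  · rintro ⟨it, hit, hk⟩
    have : pvFlagOf it ∈ PySem.Set.inter (PySem.Set.ofList keys) (PySem.Set.ofList (l.map pvFlagOf)) := by
      rw [PySem.Set.mem_inter _ _ _, PySem.Set.mem_ofList, PySem.Set.mem_ofList, List.mem_map]
      exact ⟨hk, it, hit, rfl⟩
    exact List.ne_nil_of_mem this

theorem overall_severity_py_spec : Claim_equal_overall_severity_py := by
  intro state lab_results _
  unfold Spec_overall_severity_py overall_severity_py overall_severity_py_alt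
  by_cases hs : pvSeverityToPriority.contains
      (PySem.Str.upper (PySem.Str.strip (((PySem.Dict.mk state).get? "overall_severity").getD ""))) = true
  · simp [hs]
  · simp only [Bool.not_eq_true] at hs
    simp only [hs, Bool.false_eq_true, if_false]
    rw [pvFold_spec]
    simp only [Bool.false_or, Nat.zero_add]
    have hcrit := pvInter_isEmpty_false ["CRITICAL_LOW", "CRITICAL_HIGH"] lab_results
    have hhl := pvInter_isEmpty_false ["HIGH", "LOW"] lab_results
    by_cases hc : (lab_results.any (fun it => pvFlagOf it == "CRITICAL_LOW" || pvFlagOf it == "CRITICAL_HIGH")) = true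
    · have hex : ∃ it ∈ lab_results, pvFlagOf it ∈ ["CRITICAL_LOW", "CRITICAL_HIGH"] := by
        simpa using hc
      simp [hcrit.mpr hex, hc]
    · simp only [Bool.not_eq_true] at hc
      have hnoc : ¬ ∃ it ∈ lab_results, pvFlagOf it ∈ ["CRITICAL_LOW", "CRITICAL_HIGH"] := by
        intro h
        have := hcrit.mpr h
        have h2 : (lab_results.any (fun it => pvFlagOf it == "CRITICAL_LOW" || pvFlagOf it == "CRITICAL_HIGH")) = true := by
          simpa using h
        rw [hc] at h2
        exact Bool.false_ne_true h2
      have hncE : ((PySem.Set.inter (PySem.Set.ofList ["CRITICAL_LOW", "CRITICAL_HIGH"])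
          (PySem.Set.ofList (lab_results.map pvFlagOf))).isEmpty = true) := by
        cases hE : (PySem.Set.inter (PySem.Set.ofList ["CRITICAL_LOW", "CRITICAL_HIGH"])
            (PySem.Set.ofList (lab_results.map pvFlagOf))).isEmpty with
        | true => rfl
        | false => exact absurd (hcrit.mp hE) hnoc
      by_cases hp : ∃ it ∈ lab_results, pvFlagOf it ∈ ["HIGH", "LOW"]
      · have h1le : 1 ≤ (lab_results.filter (fun it => pvFlagOf it == "HIGH" || pvFlagOf it == "LOW")).length := by
          obtain ⟨it, hit, hk⟩ := hp
          have hmem : it ∈ lab_results.filter (fun it => pvFlagOf it == "HIGH" || pvFlagOf it == "LOW") :=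
            List.mem_filter.mpr ⟨hit, by simpa using hk⟩
          exact List.length_pos_of_mem hmem
        by_cases h3 : 3 ≤ (lab_results.filter (fun it => pvFlagOf it == "HIGH" || pvFlagOf it == "LOW")).length
        · simp [hncE, hhl.mpr hp, hc, h3]
        · simp [hncE, hhl.mpr hp, hc, h3, h1le]
      · have hplE : ((PySem.Set.inter (PySem.Set.ofList ["HIGH", "LOW"])
            (PySem.Set.ofList (lab_results.map pvFlagOf))).isEmpty = true) := by
          cases hE : (PySem.Set.inter (PySem.Set.ofList ["HIGH", "LOW"])
              (PySem.Set.ofList (lab_results.map pvFlagOf))).isEmpty with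
          | true => rfl
          | false => exact absurd (hhl.mp hE) hp
        have hlen0 : (lab_results.filter (fun it => pvFlagOf it == "HIGH" || pvFlagOf it == "LOW")).length = 0 := by
          rw [List.length_eq_zero_iff, List.filter_eq_nil_iff]
          intro it hit hk
          exact hp ⟨it, hit, by simpa using hk⟩
        simp [hncE, hplE, hc, hlen0]

-- ===== VERDICT (by name: the statement is the Claim_ definition above) =====
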